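-- pv_equiv track=rewrite | github.com/pmolfese/afni | src/python_scripts/afnipy/lib_ap_examples.py | unique_substr_name_index
-- ===== SOURCE A (Python) =====
-- def unique_substr_name_index(nsub, nlist, endswith=0):
--    """search for nsub in nlist, where nsub can be a substring
--       if endswith, use name.endswith(), rather than name.find()
--       return : index >= 0 on success
--              : -1, if no match is found
--              : -2, if the match is not uniq
--    """
--    findex = -1
--    for ind, name in enumerate(nlist):
--       # first, check to see if nsub matches name
--       found = 0
--       if endswith:
--          if name.endswith(nsub):
--             found = 1
--       elif name.find(nsub) >= 0:
--          found = 1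
--
--       # if not, just move along
--       if not found:
--          continue
--
--       # if so, fail on non-unique
--       if findex >= 0:
--          # not unique
--          return -2
--
--       # we have a match, keep looking for non-uniqueness
--       findex = ind
--
--    # we have either failed to find a match, or have a unique one
--    # - either way, return findex
--    return findex
-- ===== SOURCE B (Python) =====
-- def unique_substr_name_index(nsub, nlist, endswith=0):
--    """two directional early-exit scans: first forward match and first
--       backward match; the match is unique iff the two indices coincide"""
--    if endswith:
--       def match(name): return name.endswith(nsub)
--    else:
--       def match(name): return nsub in name
--
--    first = -1
--    for i, name in enumerate(nlist):
--       if match(name):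
--          first = i
--          break
--    if first < 0:
--       return -1
--
--    last = -1
--    for i, name in reversed(list(enumerate(nlist))):
--       if match(name):
--          last = i
--          break
--
--    return first if first == last else -2
-- ===== Notes on version B (the rewrite author's own statement) =====
-- stated objective: alternative
-- what changed: Instead of A's single stateful scan with a uniqueness flag and mid-loop early return, B runs two independent early-exit scans - first matching index from the front, first matching index from the back - and declares the match unique iff the two indices coincide.
import Mathlib
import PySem

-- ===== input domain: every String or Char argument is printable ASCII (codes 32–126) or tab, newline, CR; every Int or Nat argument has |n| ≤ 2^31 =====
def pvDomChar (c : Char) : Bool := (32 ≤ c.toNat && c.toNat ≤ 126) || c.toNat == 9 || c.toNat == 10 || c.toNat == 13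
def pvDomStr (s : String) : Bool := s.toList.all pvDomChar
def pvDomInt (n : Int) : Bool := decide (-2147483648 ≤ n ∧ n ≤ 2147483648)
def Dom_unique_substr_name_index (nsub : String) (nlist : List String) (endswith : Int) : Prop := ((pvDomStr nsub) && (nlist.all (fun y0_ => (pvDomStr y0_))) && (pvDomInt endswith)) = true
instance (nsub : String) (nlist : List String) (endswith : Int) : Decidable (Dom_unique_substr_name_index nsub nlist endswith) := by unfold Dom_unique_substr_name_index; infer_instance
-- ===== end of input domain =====

-- B replaces A's stateful uniqueness-flag scan by two independent early-exit scans
-- (first match from the front, first match from the back; unique iff they coincide); objective: alternative.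

-- ===== PORT A =====
-- the for-loop of A: state is findex; early 'return -2' is the literal -2 branch
def pvLoopA (nsub : String) (endswith : Int) : List (Int × String) → Int → Int
  | [], findex => findex
  | (ind, name) :: rest, findex =>
    let found : Int :=
      if endswith ≠ 0 then
        (if PySem.Str.endswith name nsub then 1 else 0)
      else if 0 ≤ PySem.Str.find name nsub then 1 else 0
    if found = 0 then pvLoopA nsub endswith rest findex
    else if 0 ≤ findex then -2
    else pvLoopA nsub endswith rest ind

def unique_substr_name_index (nsub : String) (nlist : List String) (endswith : Int) : Int :=
  pvLoopA nsub endswith (PySem.List.enumerate nlist) (-1)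

-- ===== PORT B =====
-- Source B's two for-loops with break: return the index of the first pair whose name matches, else -1
def pvScanB (m : String → Bool) : List (Int × String) → Int
  | [] => -1
  | (i, name) :: rest => if m name then i else pvScanB m rest

def unique_substr_name_index_alt (nsub : String) (nlist : List String) (endswith : Int) : Int :=
  let m : String → Bool :=
    if endswith ≠ 0 then (fun name => PySem.Str.endswith name nsub)
    else (fun name => PySem.Str.isIn nsub name)
  let first := pvScanB m (PySem.List.enumerate nlist)
  if first < 0 then -1
  else
    let last := pvScanB m ((PySem.List.enumerate nlist).reverse)
    if first = last then first else -2

-- ===== PRECONDITION & SPEC =====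
def Spec_unique_substr_name_index (nsub : String) (nlist : List String) (endswith : Int) (out : Int) : Prop := out = unique_substr_name_index_alt nsub nlist endswith
instance (nsub : String) (nlist : List String) (endswith : Int) (out : Int) : Decidable (Spec_unique_substr_name_index nsub nlist endswith out) := by unfold Spec_unique_substr_name_index; infer_instance

-- ===== CLAIM =====
def Claim_equal_unique_substr_name_index : Prop := ∀ (nsub : String) (nlist : List String) (endswith : Int), Dom_unique_substr_name_index nsub nlist endswith → Spec_unique_substr_name_index nsub nlist endswith (unique_substr_name_index nsub nlist endswith)

-- ===== LEMMAS AND PROOFS =====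

-- the match predicate both programs test, as one Bool (in A's phrasing, via find)
def pvPred (nsub : String) (endswith : Int) (name : String) : Bool :=
  if endswith ≠ 0 then PySem.Str.endswith name nsub else decide (0 ≤ PySem.Str.find name nsub)

lemma pvLoopA_cons (nsub : String) (endswith : Int) (ind : Int) (name : String)
    (rest : List (Int × String)) (findex : Int) :
    pvLoopA nsub endswith ((ind, name) :: rest) findex =
      if pvPred nsub endswith name then
        (if 0 ≤ findex then -2 else pvLoopA nsub endswith rest ind)
      else pvLoopA nsub endswith rest findex := by
  simp only [pvLoopA, pvPred]
  by_cases he : endswith ≠ 0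
  · simp only [if_pos he]
    cases hp : PySem.Chars.endswith name.toList nsub.toList <;> simp [hp]
  · simp only [if_neg he]
    by_cases hf : (0:Int) ≤ PySem.Chars.find name.toList nsub.toList <;> simp [hf]

-- once a match was found (0 ≤ findex), the rest of the scan only checks uniqueness
lemma pvLoopA_pos (nsub : String) (endswith : Int) (es : List (Int × String)) (findex : Int)
    (h : 0 ≤ findex) :
    pvLoopA nsub endswith es findex =
      if es.filter (fun p => pvPred nsub endswith p.2) = [] then findex else -2 := by
  induction es with
  | nil => simp [pvLoopA]
  | cons q rest ih =>
    obtain ⟨ind, name⟩ := q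
    rw [pvLoopA_cons]
    cases hp : pvPred nsub endswith name
    · rw [if_neg (by simp), List.filter_cons_of_neg (by simp [hp]), ih]
    · rw [if_pos (by simp), if_pos h, List.filter_cons_of_pos (by simp [hp])]
      simp

-- before any match (findex = -1), A's result is decided by the list of matches
lemma pvLoopA_neg (nsub : String) (endswith : Int) (es : List (Int × String))
    (hinds : ∀ q ∈ es, (0:Int) ≤ q.1) :
    pvLoopA nsub endswith es (-1) =
      (match (es.filter (fun p => pvPred nsub endswith p.2)) with
       | [] => -1
       | [p] => p.1
       | _ => -2) := by
  induction es with
  | nil => simp [pvLoopA]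
  | cons q rest ih =>
    obtain ⟨ind, name⟩ := q
    have hind : (0:Int) ≤ ind := hinds (ind, name) (by simp)
    have hrest : ∀ q ∈ rest, (0:Int) ≤ q.1 := fun q hq => hinds q (by simp [hq])
    rw [pvLoopA_cons]
    cases hp : pvPred nsub endswith name
    · rw [if_neg (by simp), List.filter_cons_of_neg (by simp [hp]), ih hrest]
    · rw [if_pos (by simp), if_neg (by norm_num), List.filter_cons_of_pos (by simp [hp]),
        pvLoopA_pos nsub endswith rest ind hind]
      rcases hr : rest.filter (fun p => pvPred nsub endswith p.2) with _ | ⟨a, l⟩ <;> simp [hr]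

-- B's per-name test coincides with pvPred
lemma pvPred_eq_isIn (nsub name : String) : pvPred nsub 0 name = PySem.Str.isIn nsub name := by
  have h1 := PySem.Str.find_nonneg_iff name nsub
  have h2 := PySem.Str.isIn_iff_infix nsub name
  simp only [pvPred, if_neg (by simp : ¬ (0:Int) ≠ 0)]
  rw [Bool.eq_iff_iff]
  simp only [decide_eq_true_eq]
  rw [h1, h2]

-- Source B's break-loop returns the index of the first pair passing the test
lemma pvScanB_eq_head (m : String → Bool) (es : List (Int × String)) :
    pvScanB m es =
      (match es.filter (fun p => m p.2) with
       | [] => -1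
       | p :: _ => p.1) := by
  induction es with
  | nil => simp [pvScanB]
  | cons q rest ih =>
    obtain ⟨i, name⟩ := q
    cases hm : m name
    · rw [List.filter_cons_of_neg (by simp [hm])]
      simpa [pvScanB, hm] using ih
    · rw [List.filter_cons_of_pos (by simp [hm])]
      simp [pvScanB, hm]

-- ===== VERDICT =====
theorem unique_substr_name_index_spec : Claim_equal_unique_substr_name_index := by
  intro nsub nlist endswith _
  unfold Spec_unique_substr_name_index unique_substr_name_index unique_substr_name_index_alt
  -- B's test equals pvPred
  have hm : (if endswith ≠ 0 then (fun name => PySem.Str.endswith name nsub)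
      else (fun name => PySem.Str.isIn nsub name)) = pvPred nsub endswith := by
    by_cases he : endswith ≠ 0
    · funext name; simp [pvPred, he]
    · have h0 : endswith = 0 := by omega
      subst h0
      funext name
      simp only [if_neg (by simp : ¬ (0:Int) ≠ 0)]
      exact (pvPred_eq_isIn nsub name).symm
  rw [hm]
  have hinds : ∀ q ∈ PySem.List.enumerate nlist, (0:Int) ≤ q.1 := by
    intro q hq
    rw [PySem.List.mem_enumerate_iff] at hq
    obtain ⟨k, hk, rfl⟩ := hq
    simp
  have hpw : (PySem.List.enumerate nlist).Pairwise (fun p q => p.1 < q.1) :=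
    PySem.List.pairwise_lt_enumerate nlist 0
  have hsub : ((PySem.List.enumerate nlist).filter
      (fun p => pvPred nsub endswith p.2)).Sublist (PySem.List.enumerate nlist) :=
    List.filter_sublist
  have hmspw : ((PySem.List.enumerate nlist).filter
      (fun p => pvPred nsub endswith p.2)).Pairwise (fun p q => p.1 < q.1) := hpw.sublist hsub
  have hmsinds : ∀ q ∈ (PySem.List.enumerate nlist).filter
      (fun p => pvPred nsub endswith p.2), (0:Int) ≤ q.1 := fun q hq => hinds q (hsub.mem hq)
  rw [pvLoopA_neg nsub endswith _ hinds]
  simp only [pvScanB_eq_head, List.filter_reverse]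
  rcases hr : (PySem.List.enumerate nlist).filter (fun p => pvPred nsub endswith p.2)
    with _ | ⟨p, l⟩
  · rw [hr]; norm_num
  · rw [hr] at hmspw hmsinds ⊢
    have hp0 : (0:Int) ≤ p.1 := hmsinds p (by simp)
    rcases hl : l with _ | ⟨q, l'⟩
    · subst hl; simp [not_lt.mpr hp0]
    · -- at least two matches: the first index is smaller than the last, so they differ
      subst hl
      have hfa : ∀ x ∈ q :: l', p.1 < x.1 := (List.pairwise_cons.mp hmspw).1
      rcases hc : (q :: l').reverse with _ | ⟨r, rs⟩
      · exact absurd (congrArg List.length hc) (by simp)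
      · have hrr : (p :: q :: l').reverse = r :: (rs ++ [p]) := by
          rw [List.reverse_cons, hc]; simp
        have hrmem : r ∈ q :: l' := List.mem_reverse.mp (by rw [hc]; simp)
        have hlt : p.1 < r.1 := hfa _ hrmem
        rw [hrr]
        have h1 : ¬ p.1 < 0 := by omega
        have h2 : p.1 ≠ r.1 := by omega
        simp [h1, h2]
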